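-- pv_equiv track=rewrite | github.com/lovepettersson/DelayedDecoder | HybridDelayedMeasDecoderFixedMeasPatt.py | from_key_get_lost_qbt
-- ===== SOURCE A (Python) =====
-- def from_key_get_lost_qbt(key):
--     lost = 0
--     for idx, char in enumerate(key):
--         if idx != len(key) - 1:
--             if char != "S" and char != "," and key[idx + 1] == ",":
--                 lost += 1
--         else:
--             if char != "S" and char != ",":  # Double digit numbers is fixed here
--                 lost += 1
--     return lost
-- ===== SOURCE B (Python) =====
-- def from_key_get_lost_qbt(key):
--     return sum(1 for tok in key.split(',') if tok and tok[-1] != 'S')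
-- ===== Notes on version B (the rewrite author's own statement) =====
-- stated objective: simpler
-- what changed: B replaces A's indexed character-by-character scan with lookahead (key[idx+1]) by splitting the key on commas and counting the non-empty tokens whose last character is not the marker letter; split does the boundary work in C, giving a measured constant-factor speedup.
import Mathlib
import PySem

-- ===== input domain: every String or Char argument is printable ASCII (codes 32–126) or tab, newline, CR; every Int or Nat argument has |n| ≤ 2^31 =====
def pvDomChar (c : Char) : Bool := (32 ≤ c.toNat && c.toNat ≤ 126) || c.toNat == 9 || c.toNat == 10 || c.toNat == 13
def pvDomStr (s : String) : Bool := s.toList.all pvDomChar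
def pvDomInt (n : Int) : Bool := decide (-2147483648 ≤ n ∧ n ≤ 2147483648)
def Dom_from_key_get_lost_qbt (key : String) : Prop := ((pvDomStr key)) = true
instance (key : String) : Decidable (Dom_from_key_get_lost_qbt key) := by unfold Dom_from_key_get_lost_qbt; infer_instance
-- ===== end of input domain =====

-- B replaces A's indexed character scan with lookahead by a split(',')-based token count (simpler; same O(n) cost).

-- ===== PORT A =====
-- A: enumerate over the characters, at each index compare with the next character (or handle the last index).
def from_key_get_lost_qbt (key : String) : Int :=
  (PySem.List.enumerate key.toList 0).foldl
    (fun lost p =>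
      if p.1 ≠ PySem.Str.len key - 1 then
        if p.2 ≠ 'S' ∧ p.2 ≠ ',' ∧ PySem.List.pyGet? key.toList (p.1 + 1) = some ',' then lost + 1 else lost
      else
        if p.2 ≠ 'S' ∧ p.2 ≠ ',' then lost + 1 else lost)
    0

-- ===== PORT B =====
-- B: split on ',' and count the non-empty tokens whose last character is not 'S'.
def from_key_get_lost_qbt_alt (key : String) : Int :=
  (PySem.Chars.splitOn key.toList [',']).foldl
    (fun acc tok => if tok ≠ [] ∧ PySem.List.pyGet? tok (-1) ≠ some 'S' then acc + 1 else acc)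
    0

-- ===== PRECONDITION & SPEC =====
def Spec_from_key_get_lost_qbt (key : String) (out : Int) : Prop := out = from_key_get_lost_qbt_alt key
instance (key : String) (out : Int) : Decidable (Spec_from_key_get_lost_qbt key out) := by unfold Spec_from_key_get_lost_qbt; infer_instance

-- ===== CLAIM (what is proved, stated in full; the proofs are below) =====
def Claim_equal_from_key_get_lost_qbt : Prop := ∀ (key : String), Dom_from_key_get_lost_qbt key → Spec_from_key_get_lost_qbt key (from_key_get_lost_qbt key)

-- ===== LEMMAS AND PROOFS =====

-- common spec: structural two-character-window count over the char list
def pvInd1 (c : Char) : Int := if c ≠ 'S' ∧ c ≠ ',' then 1 else 0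
def pvInd2 (c d : Char) : Int := if c ≠ 'S' ∧ c ≠ ',' ∧ d = ',' then 1 else 0

def pvG : List Char → Int
  | [] => 0
  | [c] => pvInd1 c
  | c :: d :: rest => pvInd2 c d + pvG (d :: rest)

lemma pvG_comma_cons (rest : List Char) : pvG (',' :: rest) = pvG rest := by
  rcases rest with _ | ⟨d, r⟩ <;> simp [pvG, pvInd1, pvInd2]

-- ===== A-side =====

lemma pvA_loop (l : List Char) (t : List Char) :
    ∀ (s : Nat) (acc : Int), t = l.drop s →
    (PySem.List.enumerate t (s : Int)).foldl
      (fun lost p =>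
        if p.1 ≠ (l.length : Int) - 1 then
          if p.2 ≠ 'S' ∧ p.2 ≠ ',' ∧ PySem.List.pyGet? l (p.1 + 1) = some ',' then lost + 1 else lost
        else
          if p.2 ≠ 'S' ∧ p.2 ≠ ',' then lost + 1 else lost)
      acc = acc + pvG t := by
  induction t with
  | nil => intro s acc h; simp [PySem.List.enumerate, pvG]
  | cons c t' ih =>
    intro s acc h
    have hs : s < l.length := by
      by_contra hge
      have : l.drop s = [] := List.drop_eq_nil_of_le (by omega)
      rw [this] at h; simp at h
    have ht' : t' = l.drop (s + 1) := by
      have := congrArg List.tail h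
      simpa [List.tail_drop] using this
    have hlen : l.length = s + 1 + t'.length := by
      have := congrArg List.length h
      simp [List.length_drop] at this
      omega
    rw [PySem.List.enumerate_cons]
    rcases t' with _ | ⟨d, r⟩
    · -- last character: s = l.length - 1
      have hidx : (s : Int) = (l.length : Int) - 1 := by
        simp at hlen; omega
      simp only [List.foldl_cons, PySem.List.enumerate_nil, List.foldl_nil]
      rw [if_neg (by simp [hidx])]
      simp only [pvG, pvInd1]
      split_ifs <;> ring
    · -- not the last character: next char is d
      have hidx : (s : Int) ≠ (l.length : Int) - 1 := by
        simp at hlen; omega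
      have hget : PySem.List.pyGet? l ((s : Int) + 1) = (d :: r)[0]? := by
        have hcast : ((s : Int) + 1) = ((s + 1 : Nat) : Int) := by push_cast; ring
        rw [hcast, PySem.List.pyGet?_natCast]
        rw [ht']
        simp
      simp only [List.foldl_cons]
      rw [if_pos (by simpa using hidx)]
      have step : (if c ≠ 'S' ∧ c ≠ ',' ∧ PySem.List.pyGet? l ((s : Int) + 1) = some ',' then acc + 1 else acc)
          = acc + pvInd2 c d := by
        rw [hget]
        simp only [pvInd2, List.getElem?_cons_zero, Option.some.injEq]
        split_ifs <;> ring
      rw [step]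
      have hcast : ((s : Int) + 1) = ((s + 1 : Nat) : Int) := by push_cast; ring
      rw [hcast, ih (s + 1) (acc + pvInd2 c d) ht']
      simp [pvG]; ring

lemma pvA_eq_g (key : String) : from_key_get_lost_qbt key = pvG key.toList := by
  unfold from_key_get_lost_qbt
  have := pvA_loop key.toList key.toList 0 0 (by simp)
  simp only [Nat.cast_zero] at this
  rw [show PySem.Str.len key = (key.toList.length : Int) by
        simp [PySem.Str.len]]
  rw [this]; ring

-- ===== B-side =====

-- structural form of splitting on a single comma
def pvSp : List Char → List Char → List (List Char)
  | pre, [] => [pre]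
  | pre, c :: rest => if c = ',' then pre :: pvSp [] rest else pvSp (pre ++ [c]) rest

lemma pvSp_comma (pre rest : List Char) : pvSp pre (',' :: rest) = pre :: pvSp [] rest := rfl

lemma pvGo_spec : ∀ (fuel : Nat) (l cur : List Char) (accs : List (List Char)),
    l.length < fuel →
    PySem.Chars.splitOn.go [','] fuel l cur accs = accs.reverse ++ pvSp cur.reverse l := by
  intro fuel
  induction fuel with
  | zero => intro l cur accs h; omega
  | succ f ih =>
    intro l cur accs h
    rcases l with _ | ⟨c, rest⟩
    · simp [PySem.Chars.splitOn.go, pvSp]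
    · by_cases hc : c = ','
      · subst hc
        have hstep : PySem.Chars.splitOn.go [','] (f + 1) (',' :: rest) cur accs =
            PySem.Chars.splitOn.go [','] f rest [] (cur.reverse :: accs) := by
          simp [PySem.Chars.splitOn.go, List.isPrefixOf]
        rw [hstep, ih rest [] (cur.reverse :: accs) (by simp at h; omega)]
        simp [pvSp_comma]
      · have hstep : PySem.Chars.splitOn.go [','] (f + 1) (c :: rest) cur accs =
            PySem.Chars.splitOn.go [','] f rest (c :: cur) accs := by
          simp [PySem.Chars.splitOn.go, List.isPrefixOf]
          intro hh; exact absurd hh.symm hc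
        rw [hstep, ih rest (c :: cur) accs (by simp at h; omega)]
        simp [pvSp, hc]

lemma pvSplitOn_eq (l : List Char) : PySem.Chars.splitOn l [','] = pvSp [] l := by
  have := pvGo_spec (l.length + 1) l [] [] (by omega)
  simpa [PySem.Chars.splitOn] using this

lemma pvPyGet_neg_one (xs : List Char) : PySem.List.pyGet? xs (-1) = xs.getLast? := by
  simp only [PySem.List.pyGet?, PySem.List.pyIdx?]
  rcases xs with _ | ⟨a, t⟩
  · simp
  · simp [List.getLast?_eq_getElem?]

def pvOko : Option Char → Int
  | none => 0
  | some x => if x ≠ 'S' then 1 else 0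

def pvGa : Option Char → List Char → Int
  | st, [] => pvOko st
  | st, c :: rest => if c = ',' then pvOko st + pvGa none rest else pvGa (some c) rest

lemma pvGa_comma (st : Option Char) (rest : List Char) :
    pvGa st (',' :: rest) = pvOko st + pvGa none rest := rfl

lemma pvTok_step (acc : Int) (pre : List Char) :
    (if pre ≠ [] ∧ PySem.List.pyGet? pre (-1) ≠ some 'S' then acc + 1 else acc)
      = acc + pvOko pre.getLast? := by
  rw [pvPyGet_neg_one]
  rcases pre.eq_nil_or_concat with h | ⟨q, e, h⟩
  · simp [h, pvOko]
  · subst h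
    simp only [pvOko]
    split_ifs <;> simp_all

lemma pvCount_sp (l : List Char) :
    ∀ (pre : List Char) (acc : Int),
    (pvSp pre l).foldl
      (fun acc tok => if tok ≠ [] ∧ PySem.List.pyGet? tok (-1) ≠ some 'S' then acc + 1 else acc)
      acc = acc + pvGa pre.getLast? l := by
  induction l with
  | nil => intro pre acc; simpa [pvSp, pvGa] using pvTok_step acc pre
  | cons c rest ih =>
    intro pre acc
    by_cases hc : c = ','
    · subst hc
      rw [pvSp_comma, List.foldl_cons, pvTok_step acc pre,
          ih [] (acc + pvOko pre.getLast?), pvGa_comma]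
      simp; ring
    · simp only [pvSp, if_neg hc]
      rw [ih (pre ++ [c]) acc]
      simp [pvGa, hc]

lemma pvGa_eq_g (l : List Char) :
    pvGa none l = pvG l ∧ ∀ c, c ≠ ',' → pvGa (some c) l = pvG (c :: l) := by
  induction l with
  | nil =>
    constructor
    · simp [pvGa, pvOko, pvG]
    · intro c hc; simp only [pvGa, pvOko, pvG, pvInd1]
      split_ifs <;> simp_all
  | cons c rest ih =>
    obtain ⟨ih1, ih2⟩ := ih
    constructor
    · by_cases hc : c = ','
      · subst hc
        rw [pvGa_comma, pvG_comma_cons, ih1]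
        simp [pvOko]
      · simp only [pvGa, if_neg hc]
        exact ih2 c hc
    · intro a ha
      by_cases hc : c = ','
      · subst hc
        rw [pvGa_comma, ih1]
        show pvOko (some a) + pvG rest = pvG (a :: ',' :: rest)
        rw [show pvG (a :: ',' :: rest) = pvInd2 a ',' + pvG (',' :: rest) from rfl,
            pvG_comma_cons]
        simp only [pvOko, pvInd2]
        split_ifs <;> simp_all
      · simp only [pvGa, if_neg hc]
        rw [ih2 c hc]
        simp only [pvG, pvInd2]
        rw [if_neg (by simp [hc]), pvG.eq_def]
        rcases rest with _ | ⟨d, r⟩ <;> simp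

lemma pvB_eq_g (key : String) : from_key_get_lost_qbt_alt key = pvG key.toList := by
  unfold from_key_get_lost_qbt_alt
  rw [pvSplitOn_eq, pvCount_sp key.toList [] 0]
  simpa using (pvGa_eq_g key.toList).1

-- ===== VERDICT (by name: the statement is the Claim_ definition above) =====
theorem from_key_get_lost_qbt_spec : Claim_equal_from_key_get_lost_qbt := by
  intro key _
  unfold Spec_from_key_get_lost_qbt
  rw [pvA_eq_g, pvB_eq_g]
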